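-- pv_equiv track=rewrite | github.com/Kalana-Lakshan/Govi-Isuru | ai-service/generate_paddy_data.py | get_province
-- ===== SOURCE A (Python) =====
-- def get_province(district):
--     """Get province for a district"""
--     provinces = {
--         "Western": ["Colombo", "Gampaha", "Kalutara"],
--         "Central": ["Kandy", "Matale", "NuwaraEliya"],
--         "Southern": ["Galle", "Matara", "Hambantota"],
--         "Northern": ["Jaffna", "Kilinochchi", "Mannar", "Mullaitivu", "Vavuniya"],
--         "Eastern": ["Batticaloa", "Ampara", "Trincomalee"],
--         "North Western": ["Kurunegala", "Puttalam"],
--         "North Central": ["Anuradhapura", "Polonnaruwa"],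
--         "Uva": ["Badulla", "Monaragala"],
--         "Sabaragamuwa": ["Ratnapura", "Kegalle"]
--     }
--
--     for province, districts in provinces.items():
--         if district in districts:
--             return province
--     return "Unknown"
-- ===== SOURCE B (Python) =====
-- # Flat district -> province table built once at module load; lookup is a single .get.
-- _DISTRICT_TO_PROVINCE = {
--     "Colombo": "Western", "Gampaha": "Western", "Kalutara": "Western",
--     "Kandy": "Central", "Matale": "Central", "NuwaraEliya": "Central",
--     "Galle": "Southern", "Matara": "Southern", "Hambantota": "Southern",
--     "Jaffna": "Northern", "Kilinochchi": "Northern", "Mannar": "Northern",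
--     "Mullaitivu": "Northern", "Vavuniya": "Northern",
--     "Batticaloa": "Eastern", "Ampara": "Eastern", "Trincomalee": "Eastern",
--     "Kurunegala": "North Western", "Puttalam": "North Western",
--     "Anuradhapura": "North Central", "Polonnaruwa": "North Central",
--     "Badulla": "Uva", "Monaragala": "Uva",
--     "Ratnapura": "Sabaragamuwa", "Kegalle": "Sabaragamuwa",
-- }
--
-- def get_province(district):
--     """Get province for a district"""
--     return _DISTRICT_TO_PROVINCE.get(district, "Unknown")
-- ===== Notes on version B (the rewrite author's own statement) =====
-- stated objective: simpler
-- what changed: Replaces the per-call scan over province lists (membership test per province, early return) with a flat literal district->province table and a single dict .get with the same default; districts are unique across provinces, so the lookup agrees with A's first-match scan.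
import Mathlib
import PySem

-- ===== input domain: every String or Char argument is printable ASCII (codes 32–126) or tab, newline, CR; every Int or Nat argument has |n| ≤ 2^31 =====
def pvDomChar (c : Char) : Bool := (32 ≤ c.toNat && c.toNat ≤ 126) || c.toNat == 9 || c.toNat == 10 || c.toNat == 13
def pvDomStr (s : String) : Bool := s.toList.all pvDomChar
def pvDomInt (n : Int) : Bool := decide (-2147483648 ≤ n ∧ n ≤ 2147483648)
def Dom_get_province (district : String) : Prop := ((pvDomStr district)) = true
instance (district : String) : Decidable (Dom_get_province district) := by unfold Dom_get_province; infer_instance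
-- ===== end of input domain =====

-- B replaces A's per-province membership scan by one flat district→province table with a single default lookup ("simpler").

-- ===== PORT A =====
-- the literal dict of A, as an insertion-ordered association list
def pvProvinces : List (String × List String) :=
  [("Western", ["Colombo", "Gampaha", "Kalutara"]),
   ("Central", ["Kandy", "Matale", "NuwaraEliya"]),
   ("Southern", ["Galle", "Matara", "Hambantota"]),
   ("Northern", ["Jaffna", "Kilinochchi", "Mannar", "Mullaitivu", "Vavuniya"]),
   ("Eastern", ["Batticaloa", "Ampara", "Trincomalee"]),
   ("North Western", ["Kurunegala", "Puttalam"]),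
   ("North Central", ["Anuradhapura", "Polonnaruwa"]),
   ("Uva", ["Badulla", "Monaragala"]),
   ("Sabaragamuwa", ["Ratnapura", "Kegalle"])]

-- the `for province, districts in provinces.items(): if district in districts: return province` loop
def pvScan (district : String) : List (String × List String) → String
  | [] => "Unknown"
  | (province, districts) :: rest =>
      if districts.contains district then province else pvScan district rest

def get_province (district : String) : String := pvScan district pvProvinces

-- ===== PORT B =====
-- B's module-level flat table _DISTRICT_TO_PROVINCE, a literal dict
def pvDistrictToProvince : PySem.Dict String String := PySem.Dict.mk
  [("Colombo", "Western"), ("Gampaha", "Western"), ("Kalutara", "Western"),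
   ("Kandy", "Central"), ("Matale", "Central"), ("NuwaraEliya", "Central"),
   ("Galle", "Southern"), ("Matara", "Southern"), ("Hambantota", "Southern"),
   ("Jaffna", "Northern"), ("Kilinochchi", "Northern"), ("Mannar", "Northern"),
   ("Mullaitivu", "Northern"), ("Vavuniya", "Northern"),
   ("Batticaloa", "Eastern"), ("Ampara", "Eastern"), ("Trincomalee", "Eastern"),
   ("Kurunegala", "North Western"), ("Puttalam", "North Western"),
   ("Anuradhapura", "North Central"), ("Polonnaruwa", "North Central"),
   ("Badulla", "Uva"), ("Monaragala", "Uva"),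
   ("Ratnapura", "Sabaragamuwa"), ("Kegalle", "Sabaragamuwa")]

def get_province_alt (district : String) : String :=
  pvDistrictToProvince.getD district "Unknown"

-- ===== PRECONDITION & SPEC =====
def Spec_get_province (district : String) (out : String) : Prop := out = get_province_alt district
instance (district : String) (out : String) : Decidable (Spec_get_province district out) := by unfold Spec_get_province; infer_instance

-- ===== CLAIM =====
def Claim_equal_get_province : Prop := ∀ (district : String), Dom_get_province district → Spec_get_province district (get_province district)

-- ===== LEMMAS AND PROOFS =====

-- ===== VERDICT =====
theorem get_province_spec : Claim_equal_get_province := by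
  intro district _
  unfold Spec_get_province
  by_cases h : district ∈ (["Colombo", "Gampaha", "Kalutara", "Kandy", "Matale", "NuwaraEliya", "Galle", "Matara", "Hambantota", "Jaffna", "Kilinochchi", "Mannar", "Mullaitivu", "Vavuniya", "Batticaloa", "Ampara", "Trincomalee", "Kurunegala", "Puttalam", "Anuradhapura", "Polonnaruwa", "Badulla", "Monaragala", "Ratnapura", "Kegalle"] : List String)
  · fin_cases h <;> decide
  · simp only [List.mem_cons, List.not_mem_nil, or_false, not_or] at h
    obtain ⟨h1, h2, h3, h4, h5, h6, h7, h8, h9, h10, h11, h12, h13, h14, h15, h16, h17, h18, h19, h20, h21, h22, h23, h24, h25⟩ := h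
    unfold get_province get_province_alt
    simp [pvScan, pvProvinces, pvDistrictToProvince, PySem.Dict.getD_eq_get?_getD,
      beq_iff_eq, h1, Ne.symm h1, h2, Ne.symm h2, h3, Ne.symm h3, h4, Ne.symm h4, h5, Ne.symm h5, h6, Ne.symm h6, h7, Ne.symm h7, h8, Ne.symm h8, h9, Ne.symm h9, h10, Ne.symm h10, h11, Ne.symm h11, h12, Ne.symm h12, h13, Ne.symm h13, h14, Ne.symm h14, h15, Ne.symm h15, h16, Ne.symm h16, h17, Ne.symm h17, h18, Ne.symm h18, h19, Ne.symm h19, h20, Ne.symm h20, h21, Ne.symm h21, h22, Ne.symm h22, h23, Ne.symm h23, h24, Ne.symm h24, h25, Ne.symm h25, PySem.Dict.get?]
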